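-- pv_equiv track=rewrite | github.com/JoaquinMateosBarroso/Causal-Inference | src/libs/2GVecCI-main/Functions_2GVecCI.py | get_fixed_aux_parameters
-- ===== SOURCE A (Python) =====
-- import copy
-- import itertools
--
-- def get_all_aux_parameters(plot_parameter, full_parameters):
--     ##helper function to separate the parameter along which a plot is to happen and the remaining parameters
--     aux_parameters = copy.deepcopy(full_parameters)
--     del aux_parameters[plot_parameter]
--     return aux_parameters
--
-- def get_fixed_aux_parameters(plot_parameter, full_parameters):
--     ##helper function to list all auxillary parameters
--     all_aux = get_all_aux_parameters(plot_parameter,full_parameters)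
--     aux_par_list = []
--     for aux_config in itertools.product(*list(all_aux.values())):
--         listed_aux_config = []
--         for entry in aux_config:
--             listed_aux_config.append([entry])
--         fixed_dict = dict(zip(all_aux.keys(),listed_aux_config))
--         aux_par_list.append(fixed_dict)
--     return aux_par_list
-- ===== SOURCE B (Python) =====
-- import copy
--
-- def get_all_aux_parameters(plot_parameter, full_parameters):
--     ##helper function to separate the parameter along which a plot is to happen and the remaining parameters
--     aux_parameters = copy.deepcopy(full_parameters)
--     del aux_parameters[plot_parameter]
--     return aux_parameters
--
-- def get_fixed_aux_parameters(plot_parameter, full_parameters):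
--     # Build the list of fixed configurations in one pass over the remaining keys,
--     # threading a growing list of partial dicts instead of reshaping product tuples.
--     result = [{}]
--     for key, values in get_all_aux_parameters(plot_parameter, full_parameters).items():
--         result = [{**d, key: [v]} for d in result for v in values]
--     return result
-- ===== Notes on version B (the rewrite author's own statement) =====
-- stated objective: simpler
-- what changed: Replaces itertools.product over full value tuples plus a reshaping pass (wrap each entry, zip with keys, build a dict) by a single pass over the remaining keys that threads a growing list of partial dicts, inserting each value already wrapped as a singleton list.
import Mathlib
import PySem

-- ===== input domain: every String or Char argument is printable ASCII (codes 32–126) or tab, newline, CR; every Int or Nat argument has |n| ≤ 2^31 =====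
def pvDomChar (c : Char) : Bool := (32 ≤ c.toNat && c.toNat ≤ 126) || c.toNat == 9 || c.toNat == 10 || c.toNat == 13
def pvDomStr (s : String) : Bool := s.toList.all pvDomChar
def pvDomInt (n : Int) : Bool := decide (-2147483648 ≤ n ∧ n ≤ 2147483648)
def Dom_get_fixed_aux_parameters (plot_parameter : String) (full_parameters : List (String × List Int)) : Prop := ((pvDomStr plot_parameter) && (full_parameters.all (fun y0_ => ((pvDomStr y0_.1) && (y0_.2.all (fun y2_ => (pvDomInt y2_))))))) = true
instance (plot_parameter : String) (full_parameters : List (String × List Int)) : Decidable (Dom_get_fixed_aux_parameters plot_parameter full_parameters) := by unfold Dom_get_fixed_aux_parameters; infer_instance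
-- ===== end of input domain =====

-- B builds the configurations in one pass over the remaining keys, threading a growing
-- list of partial dicts, instead of A's itertools.product over value tuples + reshape
-- (objective: simpler). Equal return value on all inputs where A returns (Pre_ below).

-- ===== PORT A =====
-- shared helper (both Pythons call it): deepcopy + `del aux_parameters[plot_parameter]`;
-- the KeyError when plot_parameter is absent is excluded by Pre_ below.
def get_all_aux_parameters (plot_parameter : String) (full_parameters : List (String × List Int)) : List (String × List Int) :=
  full_parameters.eraseP (fun kv => kv.1 == plot_parameter)

-- itertools.product(*lists): leftmost factor varies slowest
def pvProduct : List (List Int) → List (List Int)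
  | [] => [[]]
  | vs :: rest => vs.flatMap (fun v => (pvProduct rest).map (fun t => v :: t))

def get_fixed_aux_parameters (plot_parameter : String) (full_parameters : List (String × List Int)) : List (List (String × List Int)) :=
  let all_aux := get_all_aux_parameters plot_parameter full_parameters
  -- for aux_config in product(*all_aux.values()): wrap each entry in a singleton list,
  -- then dict(zip(all_aux.keys(), listed_aux_config)) as an assoc list
  (pvProduct (all_aux.map (·.2))).map (fun aux_config =>
    (all_aux.map (·.1)).zip (aux_config.map (fun entry => [entry])))

-- ===== PORT B =====
def get_fixed_aux_parameters_alt (plot_parameter : String) (full_parameters : List (String × List Int)) : List (List (String × List Int)) :=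
  (get_all_aux_parameters plot_parameter full_parameters).foldl
    (fun result kv => result.flatMap (fun d => kv.2.map (fun v => d ++ [(kv.1, [v])])))
    [[]]

-- ===== PRECONDITION & SPEC =====
-- Pre_ excludes (a) inputs where plot_parameter is not a key, on which Python A raises
-- KeyError, and (b) assoc lists with duplicate keys, which a Python dict cannot represent.
def Pre_get_fixed_aux_parameters (plot_parameter : String) (full_parameters : List (String × List Int)) : Prop :=
  plot_parameter ∈ full_parameters.map Prod.fst ∧ (full_parameters.map Prod.fst).Nodup
instance (plot_parameter : String) (full_parameters : List (String × List Int)) : Decidable (Pre_get_fixed_aux_parameters plot_parameter full_parameters) := by unfold Pre_get_fixed_aux_parameters; infer_instance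

def pvWitness_get_fixed_aux_parameters : String × (List (String × List Int)) :=
  ("p", [("p", [0]), ("a", [1, 2]), ("b", [3])])

def Spec_get_fixed_aux_parameters (plot_parameter : String) (full_parameters : List (String × List Int)) (out : List (List (String × List Int))) : Prop := out = get_fixed_aux_parameters_alt plot_parameter full_parameters
instance (plot_parameter : String) (full_parameters : List (String × List Int)) (out : List (List (String × List Int))) : Decidable (Spec_get_fixed_aux_parameters plot_parameter full_parameters out) := by unfold Spec_get_fixed_aux_parameters; infer_instance

-- ===== CLAIM (what is proved, stated in full; the proofs are below) =====
def Claim_equal_get_fixed_aux_parameters : Prop := ∀ (plot_parameter : String) (full_parameters : List (String × List Int)), Dom_get_fixed_aux_parameters plot_parameter full_parameters → Pre_get_fixed_aux_parameters plot_parameter full_parameters → Spec_get_fixed_aux_parameters plot_parameter full_parameters (get_fixed_aux_parameters plot_parameter full_parameters)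

-- ===== LEMMAS AND PROOFS =====
-- B's fold over the remaining keys, from any list of partial rows, yields each row
-- extended by every configuration A's product-and-zip produces.
lemma pvFoldl_eq_product (aux : List (String × List Int)) (res : List (List (String × List Int))) :
    aux.foldl (fun result kv => result.flatMap (fun d => kv.2.map (fun v => d ++ [(kv.1, [v])]))) res
      = res.flatMap (fun d => (pvProduct (aux.map (·.2))).map (fun cfg =>
          d ++ (aux.map (·.1)).zip (cfg.map (fun entry => [entry])))) := by
  induction aux generalizing res with
  | nil => simp [pvProduct]
  | cons kv rest ih =>
      rw [List.foldl_cons, ih]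
      simp [pvProduct, List.flatMap_map, List.map_flatMap, List.flatMap_assoc,
            Function.comp_def, List.append_assoc]

-- ===== VERDICT (by name: the statement is the Claim_ definition above) =====
theorem get_fixed_aux_parameters_spec : Claim_equal_get_fixed_aux_parameters := by
  intro p fp _ _
  show get_fixed_aux_parameters p fp = get_fixed_aux_parameters_alt p fp
  unfold get_fixed_aux_parameters get_fixed_aux_parameters_alt
  rw [pvFoldl_eq_product]
  simp
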